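-- pv_equiv track=rewrite | github.com/htsofie/phospho-idr | scripts/match_morf_interfaces.py | extract_morf_positions
-- ===== SOURCE A (Python) =====
-- def extract_morf_positions(annotation_line: str, sequence: str) -> str:
--     """
--     Parse annotation line and convert '1' positions to range format.
--
--     Args:
--         annotation_line: String of 0, 1, - characters
--         sequence: Protein sequence (for validation)
--
--     Returns:
--         Formatted string: [20-30,40,50-60] (1-indexed positions)
--     """
--     positions = []
--
--     # Find all positions where character is '1' (1-indexed)
--     for i, char in enumerate(annotation_line, start=1):
--         if char == '1':
--             positions.append(i)
--
--     if not positions: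
--         return '[]'
--
--     # Group consecutive positions into ranges
--     ranges = []
--     start = positions[0]
--     end = positions[0]
--
--     for i in range(1, len(positions)):
--         if positions[i] == end + 1:
--             # Consecutive, extend range
--             end = positions[i]
--         else:
--             # Gap found, save current range
--             if start == end:
--                 ranges.append(str(start))
--             else:
--                 ranges.append(f"{start}-{end}")
--             start = positions[i]
--             end = positions[i]
--
--     # Add last range
--     if start == end:
--         ranges.append(str(start))
--     else:
--         ranges.append(f"{start}-{end}")
--
--     return '[' + ','.join(ranges) + ']'
-- ===== SOURCE B (Python) =====
-- def extract_morf_positions(annotation_line: str, sequence: str) -> str: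
--     """Single-pass: emit ranges directly while scanning annotation_line."""
--     ranges = []
--     start = None
--     for i, char in enumerate(annotation_line, start=1):
--         if char == '1':
--             if start is None:
--                 start = i
--         elif start is not None:
--             end = i - 1
--             ranges.append(str(start) if start == end else f"{start}-{end}")
--             start = None
--     if start is not None:
--         end = len(annotation_line)
--         ranges.append(str(start) if start == end else f"{start}-{end}")
--     return '[' + ','.join(ranges) + ']'
-- ===== Notes on version B (the rewrite author's own statement) =====
-- stated objective: simpler
-- what changed: Replaces A's two-phase approach (build the full list of '1' positions, then group it into ranges with a second loop) by a single scan of annotation_line that tracks only the start of the current run and emits each range directly when the run ends.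
import Mathlib
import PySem

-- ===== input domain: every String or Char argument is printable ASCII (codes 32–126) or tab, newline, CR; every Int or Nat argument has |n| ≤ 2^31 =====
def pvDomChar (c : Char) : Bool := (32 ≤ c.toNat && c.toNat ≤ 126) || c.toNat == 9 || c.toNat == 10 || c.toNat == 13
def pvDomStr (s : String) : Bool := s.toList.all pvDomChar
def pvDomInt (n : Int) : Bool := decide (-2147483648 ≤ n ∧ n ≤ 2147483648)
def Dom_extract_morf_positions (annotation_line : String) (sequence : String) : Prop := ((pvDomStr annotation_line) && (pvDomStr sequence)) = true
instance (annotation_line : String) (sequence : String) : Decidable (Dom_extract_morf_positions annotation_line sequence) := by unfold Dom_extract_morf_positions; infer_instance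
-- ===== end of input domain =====

-- B emits ranges in one scan of annotation_line instead of building the positions list first (simpler decomposition, same O(n) cost).

-- ===== PORT A =====
-- helper: the f-string / str(...) formatting of one range (shared shape in both Pythons)
def pvA_fmt (s e : Int) : String :=
  if s = e then PySem.Int.toStr s else PySem.Int.toStr s ++ "-" ++ PySem.Int.toStr e

-- 'for i, char in enumerate(annotation_line, start=1): if char == '1': positions.append(i)'
def pvA_positions : List Char → Int → List Int
  | [], _ => []
  | c :: cs, i => if c = '1' then i :: pvA_positions cs (i + 1) else pvA_positions cs (i + 1)

-- 'for i in range(1, len(positions)): ...' plus the final 'Add last range' append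
def pvA_loop : List Int → List String → Int → Int → List String
  | [], ranges, s, e => ranges ++ [pvA_fmt s e]
  | p :: ps, ranges, s, e =>
      if p = e + 1 then pvA_loop ps ranges s p
      else pvA_loop ps (ranges ++ [pvA_fmt s e]) p p

def extract_morf_positions (annotation_line : String) (sequence : String) : String :=
  match pvA_positions annotation_line.toList 1 with
  | [] => "[]"
  | p :: ps => "[" ++ PySem.Str.join "," (pvA_loop ps [] p p) ++ "]"

-- ===== PORT B =====
-- one pass over the characters; state = (emitted ranges, optional start of the open run);
-- at the end of the list i - 1 = len(annotation_line), the final flush of Source B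
def pvB_loop : List Char → Int → List String → Option Int → List String
  | [], _, ranges, none => ranges
  | [], i, ranges, some s => ranges ++ [pvA_fmt s (i - 1)]
  | c :: cs, i, ranges, st =>
      if c = '1' then
        match st with
        | none => pvB_loop cs (i + 1) ranges (some i)
        | some s => pvB_loop cs (i + 1) ranges (some s)
      else
        match st with
        | some s => pvB_loop cs (i + 1) (ranges ++ [pvA_fmt s (i - 1)]) none
        | none => pvB_loop cs (i + 1) ranges none

def extract_morf_positions_alt (annotation_line : String) (sequence : String) : String :=
  "[" ++ PySem.Str.join "," (pvB_loop annotation_line.toList 1 [] none) ++ "]"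

-- ===== PRECONDITION & SPEC =====
def Spec_extract_morf_positions (annotation_line : String) (sequence : String) (out : String) : Prop := out = extract_morf_positions_alt annotation_line sequence
instance (annotation_line : String) (sequence : String) (out : String) : Decidable (Spec_extract_morf_positions annotation_line sequence out) := by unfold Spec_extract_morf_positions; infer_instance

-- ===== CLAIM (what is proved, stated in full; the proofs are below) =====
def Claim_equal_extract_morf_positions : Prop := ∀ (annotation_line : String) (sequence : String), Dom_extract_morf_positions annotation_line sequence → Spec_extract_morf_positions annotation_line sequence (extract_morf_positions annotation_line sequence)

-- ===== LEMMAS AND PROOFS =====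

theorem pvA_positions_ge : ∀ (cs : List Char) (i p : Int), p ∈ pvA_positions cs i → i ≤ p := by
  intro cs
  induction cs with
  | nil => intro i p h; simp [pvA_positions] at h
  | cons c cs ih =>
    intro i p h
    simp only [pvA_positions] at h
    split at h
    · rcases List.mem_cons.1 h with h | h
      · omega
      · have := ih (i + 1) p h; omega
    · have := ih (i + 1) p h; omega

theorem pvB_loop_eq :
    ∀ (cs : List Char) (i : Int) (r : List String),
      (∀ s : Int, pvB_loop cs i r (some s) = pvA_loop (pvA_positions cs i) r s (i - 1)) ∧
      (pvB_loop cs i r none =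
        match pvA_positions cs i with
        | [] => r
        | p :: ps => pvA_loop ps r p p) := by
  intro cs
  induction cs with
  | nil =>
    intro i r
    constructor
    · intro s; simp [pvB_loop, pvA_positions, pvA_loop]
    · simp [pvB_loop, pvA_positions]
  | cons c cs ih =>
    intro i r
    constructor
    · intro s
      by_cases hc : c = '1'
      · simp only [pvB_loop, pvA_positions, hc]
        rw [(ih (i + 1) r).1 s]
        have : i = (i - 1) + 1 := by omega
        simp [pvA_loop, show i + 1 - 1 = i from by omega]
      · simp only [pvB_loop, pvA_positions, if_neg hc]
        rw [(ih (i + 1) (r ++ [pvA_fmt s (i - 1)])).2]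
        cases hp : pvA_positions cs (i + 1) with
        | nil => simp [pvA_loop]
        | cons p ps =>
          have hge : i + 1 ≤ p := pvA_positions_ge cs (i + 1) p (by simp [hp])
          rw [pvA_loop, if_neg (show ¬ p = (i - 1) + 1 from by omega)]
    · by_cases hc : c = '1'
      · simp only [pvB_loop, pvA_positions, hc]
        rw [(ih (i + 1) r).1 i]
        simp [show i + 1 - 1 = i from by omega]
      · simp only [pvB_loop, pvA_positions, if_neg hc]
        exact (ih (i + 1) r).2

-- ===== VERDICT (by name: the statement is the Claim_ definition above) =====
theorem extract_morf_positions_spec : Claim_equal_extract_morf_positions := by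
  intro annotation_line sequence _
  unfold Spec_extract_morf_positions extract_morf_positions extract_morf_positions_alt
  rw [(pvB_loop_eq annotation_line.toList 1 []).2]
  cases h : pvA_positions annotation_line.toList 1 with
  | nil => simp [PySem.Str.join]
  | cons p ps => rfl
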